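-- pv_equiv track=rewrite | github.com/Fondamenti18/fondamenti-di-programmazione | students/1808381/homework03/program01.py | trova
-- ===== SOURCE A (Python) =====
-- def trova(matrice):
--     lista = []
--     listaMassimi = []
--     a = []
--     listaMassimi += [max(matrice[i]) for i in range(len(matrice))]
--     lista += [((matrice[i].index(max(matrice[i]))), i) for i in range(len(matrice))]
--
--     for cordinata in lista[listaMassimi.index(max(listaMassimi))] :
--         cordinata = cordinata - max(listaMassimi) + 1
--         a += [cordinata]
--     return max(listaMassimi), tuple(a)
-- ===== SOURCE B (Python) =====
-- def trova(matrice):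
--     best = None
--     for i, row in enumerate(matrice):
--         m = max(row)
--         if best is None or m > best[0]:
--             best = (m, (row.index(m) - m + 1, i - m + 1))
--     return best[0], best[1]
-- ===== Notes on version B (the rewrite author's own statement) =====
-- stated objective: simpler
-- what changed: One enumerate pass keeping the running best (value, transformed position) replaces A's two full list comprehensions plus back-indexing via listaMassimi.index and a rebuild loop.
import Mathlib
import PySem

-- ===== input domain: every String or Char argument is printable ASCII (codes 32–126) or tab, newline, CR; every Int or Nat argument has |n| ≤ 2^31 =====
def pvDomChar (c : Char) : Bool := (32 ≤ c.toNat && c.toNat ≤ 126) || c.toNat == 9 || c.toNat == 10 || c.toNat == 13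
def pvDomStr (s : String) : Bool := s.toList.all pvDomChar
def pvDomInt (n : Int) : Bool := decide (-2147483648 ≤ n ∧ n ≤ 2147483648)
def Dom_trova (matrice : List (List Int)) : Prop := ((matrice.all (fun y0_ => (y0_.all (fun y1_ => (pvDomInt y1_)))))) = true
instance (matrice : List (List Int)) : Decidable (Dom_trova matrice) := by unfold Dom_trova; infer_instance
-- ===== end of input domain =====

-- B replaces A's two comprehensions + back-indexing by one running-best pass; objective: simpler.

-- ===== PORT A =====
-- Literal transliteration of A: build listaMassimi and lista, take the global max M,
-- back-index the coordinate pair, and the final for-loop over the 2-tuple maps each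
-- coordinate to c - M + 1 (written out for the two components).
def trova (matrice : List (List Int)) : Int × (Int × Int) :=
  let listaMassimi := (PySem.List.pyRange 0 (matrice.length : Int) 1).map
    (fun i => (PySem.List.max? (PySem.List.pyGetD matrice i []) (fun y => y)).getD 0)
  let lista := (PySem.List.pyRange 0 (matrice.length : Int) 1).map
    (fun i => ((((PySem.List.index? (PySem.List.pyGetD matrice i [])
        ((PySem.List.max? (PySem.List.pyGetD matrice i []) (fun y => y)).getD 0)).getD 0 : Nat) : Int), i))
  let M := (PySem.List.max? listaMassimi (fun y => y)).getD 0
  let pair := PySem.List.pyGetD lista (((PySem.List.index? listaMassimi M).getD 0 : Nat) : Int) (0, 0)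
  (M, (pair.1 - M + 1, pair.2 - M + 1))

-- ===== PORT B =====
-- one step of B's loop body: m = max(row); keep the strictly larger row-max (first wins)
def trovaStep (acc : Option (Int × (Int × Int))) (p : Int × List Int) : Option (Int × (Int × Int)) :=
  let m := (PySem.List.max? p.2 (fun y => y)).getD 0
  match acc with
  | none => some (m, ((((PySem.List.index? p.2 m).getD 0 : Nat) : Int) - m + 1, p.1 - m + 1))
  | some (bv, pos) =>
    if bv < m then some (m, ((((PySem.List.index? p.2 m).getD 0 : Nat) : Int) - m + 1, p.1 - m + 1))
    else some (bv, pos)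

def trova_alt (matrice : List (List Int)) : Int × (Int × Int) :=
  ((PySem.List.enumerate matrice 0).foldl trovaStep none).getD (0, (0, 0))
  -- the default is never taken under Pre_: on the empty matrix Python B raises

-- ===== PRECONDITION & SPEC =====
-- Pre_ excludes exactly the inputs on which Python A raises ValueError: the empty
-- matrix (max of an empty listaMassimi) and any empty row (max of an empty row).
def Pre_trova (matrice : List (List Int)) : Prop :=
  matrice ≠ [] ∧ ∀ row ∈ matrice, row ≠ []
instance (matrice : List (List Int)) : Decidable (Pre_trova matrice) := by
  unfold Pre_trova; infer_instance
def pvWitness_trova : List (List Int) := [[1, 3], [2, 0]]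

def Spec_trova (matrice : List (List Int)) (out : Int × (Int × Int)) : Prop := out = trova_alt matrice
instance (matrice : List (List Int)) (out : Int × (Int × Int)) : Decidable (Spec_trova matrice out) := by unfold Spec_trova; infer_instance

-- ===== CLAIM (what is proved, stated in full; the proofs are below) =====
def Claim_equal_trova : Prop := ∀ (matrice : List (List Int)), Dom_trova matrice → Pre_trova matrice → Spec_trova matrice (trova matrice)

-- ===== LEMMAS AND PROOFS =====

-- row max, first column of that max, and the transformed payload at row index i
def pvF (row : List Int) : Int := (PySem.List.max? row (fun y => y)).getD 0
def pvC (row : List Int) : Int := ((PySem.List.index? row (pvF row)).getD 0 : Nat)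
def pvP (i : Int) (row : List Int) : Int × Int := (pvC row - pvF row + 1, i - pvF row + 1)

-- reference: the best (value, payload) over rows starting at index s; first row wins ties
def pvRef (s : Int) : List (List Int) → Int × (Int × Int)
  | [] => (0, (0, 0))
  | row :: rest =>
    if rest = [] then (pvF row, pvP s row)
    else
      let r := pvRef (s + 1) rest
      if pvF row < r.1 then r else (pvF row, pvP s row)

theorem pv_foldl_max_comm (l : List Int) (a b : Int) :
    List.foldl max (max a b) l = max a (List.foldl max b l) := by
  induction l generalizing b with
  | nil => rfl
  | cons x t ih =>
    simp only [List.foldl_cons, max_assoc]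
    exact ih (max b x)

theorem pvRef_char (xs : List (List Int)) (s : Int) (hne : xs ≠ []) :
    ∃ (k : Nat) (hk : k < xs.length),
      PySem.List.index? (xs.map pvF)
          ((PySem.List.max? (xs.map pvF) (fun y => y)).getD 0) = some k ∧
      pvF xs[k] = (PySem.List.max? (xs.map pvF) (fun y => y)).getD 0 ∧
      pvRef s xs = ((PySem.List.max? (xs.map pvF) (fun y => y)).getD 0, pvP (s + k) xs[k]) := by
  induction xs generalizing s with
  | nil => exact absurd rfl hne
  | cons row rest ih =>
    by_cases hr : rest = []
    · subst hr
      refine ⟨0, by simp, ?_, ?_, ?_⟩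
      · simp [PySem.List.max?_id_cons]
      · simp [PySem.List.max?_id_cons]
      · simp [pvRef, PySem.List.max?_id_cons]
    · obtain ⟨k, hk, hidx, hval, href⟩ := ih (s + 1) hr
      -- relate the full max to row's max and the rest's max
      obtain ⟨r0, rs, rfl⟩ := List.exists_cons_of_ne_nil hr
      have hMrest : (PySem.List.max? ((r0 :: rs).map pvF) (fun y => y)).getD 0
          = (rs.map pvF).foldl max (pvF r0) := by
        simp [PySem.List.max?_id_cons]
      have hMfull : (PySem.List.max? ((row :: r0 :: rs).map pvF) (fun y => y)).getD 0
          = max (pvF row) ((rs.map pvF).foldl max (pvF r0)) := by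
        simp [PySem.List.max?_id_cons, List.foldl_cons]
        exact pv_foldl_max_comm (rs.map pvF) (pvF row) (pvF r0)
      set Mr := (rs.map pvF).foldl max (pvF r0) with hMr
      by_cases hlt : pvF row < Mr
      · have hM : (PySem.List.max? ((row :: r0 :: rs).map pvF) (fun y => y)).getD 0 = Mr := by
          rw [hMfull]; exact max_eq_right hlt.le
        have hM' : (PySem.List.max? (pvF row :: (r0 :: rs).map pvF) (fun y => y)).getD 0 = Mr := by
          rw [← List.map_cons]; exact hM
        refine ⟨k + 1, by simpa using Nat.succ_lt_succ hk, ?_, ?_, ?_⟩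
        · rw [List.map_cons, PySem.List.index?_cons_of_ne (h := by rw [hM']; omega)]
          rw [hM', ← hMrest, hidx]
          simp
        · simp only [List.getElem_cons_succ]
          rw [hval, hMrest, hM]
        · have h1 : pvRef s (row :: r0 :: rs) = pvRef (s + 1) (r0 :: rs) := by
            rw [pvRef]
            simp only [if_neg (by simp : ¬ (r0 :: rs = []))]
            rw [if_pos]
            rw [href, hMrest]
            exact hlt
          rw [h1, href, ← hMrest] at *
          rw [hM]
          simp only [List.getElem_cons_succ]
          have harg : s + 1 + (k : Int) = s + (((k + 1 : Nat)) : Int) := by push_cast; ring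
          rw [harg]
      · -- row wins (or ties): it is taken, and it is the first occurrence of the max
        have hge : Mr ≤ pvF row := not_lt.mp hlt
        have hM : (PySem.List.max? ((row :: r0 :: rs).map pvF) (fun y => y)).getD 0 = pvF row := by
          rw [hMfull]; exact max_eq_left hge
        refine ⟨0, by simp, ?_, ?_, ?_⟩
        · rw [hM, List.map_cons]
          exact PySem.List.index?_cons_self _ _
        · simp only [List.getElem_cons_zero, List.map_cons] at hM ⊢
          exact hM.symm
        · rw [pvRef]
          simp only [if_neg (by simp : ¬ (r0 :: rs = []))]
          rw [if_neg, hM]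
          · simp
          · rw [href, hMrest]
            exact not_lt.mpr hge

theorem pv_foldl_step (xs : List (List Int)) (s bv : Int) (pos : Int × Int) (hne : xs ≠ []) :
    (PySem.List.enumerate xs s).foldl trovaStep (some (bv, pos)) =
      some (if bv < (pvRef s xs).1 then pvRef s xs else (bv, pos)) := by
  induction xs generalizing s bv pos with
  | nil => exact absurd rfl hne
  | cons row rest ih =>
    rw [PySem.List.enumerate_cons, List.foldl_cons]
    by_cases hr : rest = []
    · subst hr
      simp [trovaStep, pvRef, pvF, pvP, pvC]
      split_ifs <;> rfl
    · have hsome : ∀ (bv : Int) (pos : Int × Int) (p : Int × List Int),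
          trovaStep (some (bv, pos)) p
            = if bv < pvF p.2 then some (pvF p.2, pvP p.1 p.2) else some (bv, pos) := by
        intro bv pos p; rfl
      by_cases hlt : bv < pvF row
      · rw [hsome, if_pos hlt, ih (s + 1) _ _ hr, pvRef]
        simp only [if_neg hr]
        by_cases h2 : pvF row < (pvRef (s + 1) rest).1
        · rw [if_pos h2, if_pos (lt_trans hlt h2)]
        · rw [if_neg h2, if_pos (show bv < (pvF row, pvP s row).1 from hlt)]
      · rw [hsome, if_neg hlt, ih (s + 1) _ _ hr, pvRef]
        simp only [if_neg hr]
        by_cases h2 : pvF row < (pvRef (s + 1) rest).1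
        · rw [if_pos h2]
        · rw [if_neg h2,
            if_neg (show ¬ bv < (pvRef (s + 1) rest).1 by
              have h3 := not_lt.mp hlt
              have h4 := not_lt.mp h2
              omega),
            if_neg (show ¬ bv < (pvF row, pvP s row).1 from hlt)]

theorem trova_alt_eq_ref (xs : List (List Int)) (hne : xs ≠ []) :
    trova_alt xs = pvRef 0 xs := by
  obtain ⟨row, rest, rfl⟩ := List.exists_cons_of_ne_nil hne
  unfold trova_alt
  rw [PySem.List.enumerate_cons, List.foldl_cons]
  simp only [zero_add]
  have hstep : trovaStep none (0, row)
      = some (pvF row, pvP 0 row) := by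
    simp [trovaStep, pvF, pvP, pvC]
  rw [hstep]
  by_cases hr : rest = []
  · subst hr
    simp [pvRef]
  · rw [pv_foldl_step rest 1 _ _ hr, Option.getD_some, pvRef]
    simp only [if_neg hr, zero_add]

theorem trova_eq_ref (xs : List (List Int)) (hne : xs ≠ []) :
    trova xs = pvRef 0 xs := by
  obtain ⟨k, hk, hidx, hval, href⟩ := pvRef_char xs 0 hne
  simp only [trova]
  have hmap : ∀ (β : Type) (g : List Int → β),
      (PySem.List.pyRange 0 (xs.length : Int) 1).map
        (fun i => g (PySem.List.pyGetD xs i [])) = xs.map g := by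
    intro β g
    have h1 : (fun i => g (PySem.List.pyGetD xs i []))
        = g ∘ (fun i => PySem.List.pyGetD xs i []) := rfl
    rw [h1, ← List.map_map, PySem.List.map_pyGetD_pyRange_zero']
  have hLM : (PySem.List.pyRange 0 (xs.length : Int) 1).map
      (fun i => (PySem.List.max? (PySem.List.pyGetD xs i []) (fun y => y)).getD 0)
      = xs.map pvF := hmap _ pvF
  rw [hLM, hidx]
  have hpair : PySem.List.pyGetD
      ((PySem.List.pyRange 0 (xs.length : Int) 1).map
        (fun i => ((((PySem.List.index? (PySem.List.pyGetD xs i [])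
            ((PySem.List.max? (PySem.List.pyGetD xs i []) (fun y => y)).getD 0)).getD 0 : Nat) : Int), i)))
      (((some k).getD 0 : Nat) : Int) (0, 0)
      = (pvC xs[k], (k : Int)) := by
    simp only [Option.getD_some]
    rw [PySem.List.pyGetD_map_pyRange _ xs.length k _ hk]
    rw [PySem.List.pyGetD_natCast]
    have hg : xs[k]?.getD ([] : List Int) = xs[k] := by
      simp [List.getElem?_eq_getElem hk]
    simp [pvC, pvF, hg]
  rw [hpair, href]
  simp [pvP, hval]

-- ===== VERDICT (by name: the statement is the Claim_ definition above) =====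
theorem trova_spec : Claim_equal_trova := by
  intro matrice _ hpre
  unfold Spec_trova
  rw [trova_eq_ref matrice hpre.1, trova_alt_eq_ref matrice hpre.1]
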